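-- pv_equiv track=rewrite | github.com/alexdesyatnik/KEGE | 24/24_26077.py | limit1
-- ===== SOURCE A (Python) =====
-- def limit1(s):
--     pos = 0
--     count = 0
--     for i in range(len(s)):
--         if s[i] == "1":
--             count += 1
--         if count > 45:
--             return s[:i]
--     return s
-- ===== SOURCE B (Python) =====
-- def limit1(s):
--     parts = s.split("1")
--     if len(parts) > 46:
--         return "1".join(parts[:46])
--     return s
-- ===== Notes on version B (the rewrite author's own statement) =====
-- stated objective: alternative
-- what changed: Replaced A's per-character counter scan with early return by a split/rejoin decomposition: B splits the string on the separator character into pieces and, when there are more than 46 pieces (at least 46 separators), rejoins the first 46 pieces with the separator; otherwise it returns s unchanged.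
import Mathlib
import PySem

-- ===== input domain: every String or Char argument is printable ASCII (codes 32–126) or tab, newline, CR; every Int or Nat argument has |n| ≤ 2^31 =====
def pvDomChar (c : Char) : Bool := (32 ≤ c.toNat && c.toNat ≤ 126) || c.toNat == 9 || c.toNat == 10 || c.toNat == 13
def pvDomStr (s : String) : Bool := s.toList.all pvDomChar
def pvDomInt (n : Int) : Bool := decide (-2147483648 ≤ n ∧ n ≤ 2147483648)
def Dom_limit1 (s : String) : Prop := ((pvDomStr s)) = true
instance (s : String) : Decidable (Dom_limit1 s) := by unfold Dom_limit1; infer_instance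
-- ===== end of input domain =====

-- B replaces A's per-character counter scan with early return by a split/rejoin decomposition (same O(n), measured constant-factor faster via the C-level split/join).

-- ===== PORT A =====
-- A's for-loop with early return: recursion over the characters carrying the
-- running index i and the counter; returns the cut position (some i) or none.
def limit1Loop : List Char → Nat → Nat → Option Nat
  | [], _, _ => none
  | c :: rest, i, count =>
    let count' := if c == '1' then count + 1 else count
    if 45 < count' then some i else limit1Loop rest (i + 1) count'

def limit1 (s : String) : String :=
  match limit1Loop s.toList 0 0 with
  | some i => String.ofList (s.toList.take i)   -- s[:i], i a nonnegative in-range index, so Python's slice is exactly take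
  | none => s

-- ===== PORT B =====
def limit1_alt (s : String) : String :=
  -- parts = s.split("1"); the separator "1" is nonempty, so Python's split never
  -- raises: Chars.splitOn is exactly that split (split? "1" = some of it).
  let parts : List String := (PySem.Chars.splitOn s.toList "1".toList).map String.ofList
  if 46 < parts.length then PySem.Str.join "1" (parts.take 46) else s

-- ===== PRECONDITION & SPEC =====
def Spec_limit1 (s : String) (out : String) : Prop := out = limit1_alt s
instance (s : String) (out : String) : Decidable (Spec_limit1 s out) := by unfold Spec_limit1; infer_instance

-- ===== CLAIM (what is proved, stated in full; the proofs are below) =====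
def Claim_equal_limit1 : Prop := ∀ (s : String), Dom_limit1 s → Spec_limit1 s (limit1 s)

-- ===== LEMMAS AND PROOFS =====

-- Structural form of split-on-'1' used by the proofs only.
def mySplit : List Char → List (List Char)
  | [] => [[]]
  | c :: r => if c = '1' then [] :: mySplit r else (mySplit r).modifyHead (c :: ·)

theorem mySplit_ne_nil (l : List Char) : mySplit l ≠ [] := by
  cases l with
  | nil => simp [mySplit]
  | cons c r =>
    simp only [mySplit]
    split_ifs
    · simp
    · cases h : mySplit r with
      | nil => exact absurd h (mySplit_ne_nil r)
      | cons a t => simp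

theorem splitOn_go_one (fuel : Nat) : ∀ (l cur : List Char) (acc : List (List Char)),
    l.length < fuel →
    PySem.Chars.splitOn.go ['1'] fuel l cur acc
      = acc.reverse ++ (mySplit l).modifyHead (cur.reverse ++ ·) := by
  induction fuel with
  | zero => intro l cur acc h; omega
  | succ fuel ih =>
    intro l cur acc h
    cases l with
    | nil => simp [PySem.Chars.splitOn.go, mySplit]
    | cons c rest =>
      by_cases hc : c = '1'
      · subst hc
        have hpre : List.isPrefixOf ['1'] ('1' :: rest) = true := by
          simp [List.isPrefixOf]
        rw [PySem.Chars.splitOn.go]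
        simp only [hpre, if_pos, List.length_cons, List.drop_succ_cons, List.length_nil, List.drop_zero]
        rw [ih rest [] (cur.reverse :: acc) (by simpa using Nat.lt_of_succ_lt_succ h)]
        simp only [mySplit, if_pos]
        cases hms : mySplit rest with
        | nil => exact absurd hms (mySplit_ne_nil rest)
        | cons a t => simp
      · have hpre : List.isPrefixOf ['1'] (c :: rest) = false := by
          have hb : ('1' == c) = false := beq_eq_false_iff_ne.mpr (fun h => hc h.symm)
          simp [List.isPrefixOf, hb]
        rw [PySem.Chars.splitOn.go]
        simp only [hpre, Bool.false_eq_true, if_false]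
        rw [ih rest (c :: cur) acc (by simpa using Nat.lt_of_succ_lt_succ h)]
        simp only [mySplit, if_neg hc]
        cases hms : mySplit rest with
        | nil => exact absurd hms (mySplit_ne_nil rest)
        | cons a t => simp

theorem splitOn_eq_mySplit (l : List Char) :
    PySem.Chars.splitOn l ['1'] = mySplit l := by
  rw [PySem.Chars.splitOn, splitOn_go_one (l.length + 1) l [] [] (by omega)]
  cases hms : mySplit l with
  | nil => exact absurd hms (mySplit_ne_nil l)
  | cons a t => simp

theorem limit1Loop_shift (cs : List Char) : ∀ (i count : Nat),
    limit1Loop cs i count = (limit1Loop cs 0 count).map (· + i) := by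
  induction cs with
  | nil => intro i count; simp [limit1Loop]
  | cons c rest ih =>
    intro i count
    simp only [limit1Loop]
    generalize (if (c == '1') = true then count + 1 else count) = k
    split_ifs with h
    · simp
    · rw [ih (i + 1), ih 1]
      cases hL : limit1Loop rest 0 k with
      | none => rfl
      | some x => simp; omega

-- helper step equations
theorem mySplit_one (rest : List Char) : mySplit ('1' :: rest) = [] :: mySplit rest := by
  simp [mySplit]

theorem mySplit_ne (c : Char) (rest : List Char) (hc : c ≠ '1') :
    mySplit (c :: rest) = (mySplit rest).modifyHead (c :: ·) := by
  simp [mySplit, hc]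

theorem join_cons_ne_nil (a : List Char) (t : List (List Char)) (c : Char) :
    PySem.Chars.join ['1'] ((c :: a) :: t) = c :: PySem.Chars.join ['1'] (a :: t) := by
  cases t with
  | nil => simp [PySem.Chars.join_singleton]
  | cons q u => rw [PySem.Chars.join_cons_cons, PySem.Chars.join_cons_cons]; simp

theorem join_nil_cons (p : List Char) (t : List (List Char)) :
    PySem.Chars.join ['1'] ([] :: p :: t) = '1' :: PySem.Chars.join ['1'] (p :: t) := by
  rw [PySem.Chars.join_cons_cons]; simp

theorem mySplit_take_ne_nil (l : List Char) (k : Nat) (hk : 1 ≤ k) :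
    (mySplit l).take k ≠ [] := by
  have hpos := List.length_pos_iff.mpr (mySplit_ne_nil l)
  intro h
  have := congrArg List.length h
  rw [List.length_take, List.length_nil] at this
  omega

-- join of the first r pieces is the prefix of cs up to (excluding) the r-th '1'.
theorem limit1_main (cs : List Char) : ∀ (r : Nat), 1 ≤ r → r ≤ 46 →
    (limit1Loop cs 0 (46 - r)
        = if r < (mySplit cs).length
          then some (PySem.Chars.join ['1'] ((mySplit cs).take r)).length
          else none)
    ∧ (r < (mySplit cs).length →
        cs.take (PySem.Chars.join ['1'] ((mySplit cs).take r)).length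
          = PySem.Chars.join ['1'] ((mySplit cs).take r)) := by
  induction cs with
  | nil =>
    intro r h1 _
    refine ⟨?_, ?_⟩
    · have : ¬ r < (mySplit ([] : List Char)).length := by simp [mySplit]; omega
      rw [if_neg this]; rfl
    · intro hlt; exact absurd hlt (by simp [mySplit]; omega)
  | cons c rest ih =>
    intro r h1 h46
    by_cases hc : c = '1'
    · subst hc
      rw [mySplit_one]
      by_cases hr1 : r = 1
      · subst hr1
        have hlen : 1 < ([] :: mySplit rest).length := by
          have := List.length_pos_iff.mpr (mySplit_ne_nil rest)
          simp; omega
        refine ⟨?_, ?_⟩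
        · rw [if_pos hlen]
          have hL : limit1Loop ('1' :: rest) 0 (46 - 1) = some 0 := by
            simp [limit1Loop]
          rw [hL, List.take_succ_cons, List.take_zero, PySem.Chars.join_singleton]
          rfl
        · intro _
          rw [List.take_succ_cons, List.take_zero, PySem.Chars.join_singleton]
          simp
      · -- r ≥ 2: one '1' consumed, recurse with r - 1
        obtain ⟨hIH1, hIH2⟩ := ih (r - 1) (by omega) (by omega)
        have hstep : limit1Loop ('1' :: rest) 0 (46 - r) = limit1Loop rest 1 (46 - (r - 1)) := by
          have h45 : ¬ 45 < 46 - r + 1 := by omega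
          have hk : 46 - r + 1 = 46 - (r - 1) := by omega
          simp only [limit1Loop, beq_self_eq_true, if_pos]
          rw [if_neg (by simpa [hk] using h45), hk]
        obtain ⟨p, t, htk⟩ : ∃ p t, (mySplit rest).take (r - 1) = p :: t := by
          cases hx : (mySplit rest).take (r - 1) with
          | nil => exact absurd hx (mySplit_take_ne_nil rest (r - 1) (by omega))
          | cons p t => exact ⟨p, t, rfl⟩
        have hrr : r = (r - 1) + 1 := by omega
        have hjoin : PySem.Chars.join ['1'] (([] :: mySplit rest).take r)
            = '1' :: PySem.Chars.join ['1'] ((mySplit rest).take (r - 1)) := by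
          rw [hrr, List.take_succ_cons, ← hrr, htk, join_nil_cons]
        refine ⟨?_, ?_⟩
        · rw [hstep, limit1Loop_shift rest 1, hIH1]
          by_cases hlt : r - 1 < (mySplit rest).length
          · rw [if_pos hlt, if_pos (by simp; omega), hjoin]
            simp
          · rw [if_neg hlt, if_neg (by simp; omega)]
            rfl
        · intro hlt
          have hlt' : r - 1 < (mySplit rest).length := by
            simp at hlt; omega
          rw [hjoin]
          simp only [List.length_cons, List.take_succ_cons]
          rw [hIH2 hlt']
    · -- c ≠ '1': counter unchanged, first piece grows by c
      obtain ⟨hIH1, hIH2⟩ := ih r h1 h46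
      obtain ⟨a, t, hms'⟩ : ∃ a t, mySplit rest = a :: t := by
        cases hx : mySplit rest with
        | nil => exact absurd hx (mySplit_ne_nil rest)
        | cons a t => exact ⟨a, t, rfl⟩
      have hms : mySplit (c :: rest) = (c :: a) :: t := by
        rw [mySplit_ne c rest hc, hms']; rfl
      have hbeq : (c == '1') = false := beq_eq_false_iff_ne.mpr hc
      have hstep : limit1Loop (c :: rest) 0 (46 - r) = limit1Loop rest 1 (46 - r) := by
        have h45 : ¬ 45 < 46 - r := by omega
        simp only [limit1Loop, hbeq, Bool.false_eq_true, if_false]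
        rw [if_neg h45]
      have hjoin : ∀ k : Nat, 1 ≤ k →
          PySem.Chars.join ['1'] (((c :: a) :: t).take k)
            = c :: PySem.Chars.join ['1'] ((a :: t).take k) := by
        intro k hk
        obtain ⟨k', rfl⟩ : ∃ k', k = k' + 1 := ⟨k - 1, by omega⟩
        rw [List.take_succ_cons, List.take_succ_cons, join_cons_ne_nil]
      refine ⟨?_, ?_⟩
      · rw [hstep, limit1Loop_shift rest 1, hIH1, hms, hms']
        by_cases hlt : r < (a :: t).length
        · rw [if_pos hlt, if_pos (show r < ((c :: a) :: t).length by simpa using hlt),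
            hjoin r h1]
          simp
        · rw [if_neg hlt, if_neg (show ¬ r < ((c :: a) :: t).length by simpa using hlt)]
          rfl
      · intro hlt
        rw [hms] at hlt ⊢
        rw [hjoin r h1]
        simp only [List.length_cons, List.take_succ_cons]
        rw [← hms', hIH2 (by rw [hms']; simpa using hlt)]

-- ===== VERDICT (by name: the statement is the Claim_ definition above) =====
theorem limit1_spec : Claim_equal_limit1 := by
  intro s _
  unfold Spec_limit1 limit1 limit1_alt
  obtain ⟨h1, h2⟩ := limit1_main s.toList 46 (by omega) (by omega)
  simp only [Nat.sub_self] at h1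
  have hone : ("1" : String).toList = ['1'] := rfl
  have hsplit : PySem.Chars.splitOn s.toList "1".toList = mySplit s.toList := by
    rw [hone, splitOn_eq_mySplit]
  simp only [hsplit, List.length_map]
  by_cases hlt : 46 < (mySplit s.toList).length
  · rw [h1]
    simp only [if_pos hlt]
    apply String.toList_inj.mp
    rw [PySem.Str.toList_join, hone]
    have hmid : List.map String.toList (List.take 46 (List.map String.ofList (mySplit s.toList)))
        = List.take 46 (mySplit s.toList) := by
      have hco : (String.toList ∘ String.ofList) = id := funext fun l => String.toList_ofList
      rw [← List.map_take, List.map_map, hco, List.map_id]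
    rw [hmid, String.toList_ofList]
    exact h2 hlt
  · rw [h1]
    simp only [if_neg hlt]
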